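-- pv_equiv track=rewrite | github.com/GitMonsters/octotetrahedral-agi | arc-puzzle-catalog/solves/1949602d/solver.py | transform
-- ===== SOURCE A (Python) =====
-- def transform(grid):
--     from collections import Counter
--     rows, cols = len(grid), len(grid[0])
--     bg = Counter(grid[r][c] for r in range(rows) for c in range(cols)).most_common(1)[0][0]
--
--     non_bg = [(r, c) for r in range(rows) for c in range(cols) if grid[r][c] != bg]
--     if not non_bg:
--         return [row[:] for row in grid]
--
--     bb_r1 = min(r for r, c in non_bg)
--     bb_r2 = max(r for r, c in non_bg)
--     bb_c1 = min(c for r, c in non_bg)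
--     bb_c2 = max(c for r, c in non_bg)
--
--     if bb_r1 <= rows - 1 - bb_r2:
--         ext_r1, ext_r2 = 0, bb_r2
--     else:
--         ext_r1, ext_r2 = bb_r1, rows - 1
--
--     if bb_c1 <= cols - 1 - bb_c2:
--         ext_c1, ext_c2 = 0, bb_c2
--     else:
--         ext_c1, ext_c2 = bb_c1, cols - 1
--
--     tile_h = ext_r2 - ext_r1 + 1
--     tile_w = ext_c2 - ext_c1 + 1
--     period_v = tile_h + 1
--     period_h = tile_w + 1
--
--     out = [[bg] * cols for _ in range(rows)]
--     for r in range(rows):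
--         for c in range(cols):
--             dr = (r - ext_r1) % period_v
--             dc = (c - ext_c1) % period_h
--             if dr < tile_h and dc < tile_w:
--                 out[r][c] = grid[ext_r1 + dr][ext_c1 + dc]
--     return out
-- ===== SOURCE B (Python) =====
-- def transform(grid):
--     from collections import Counter
--     rows, cols = len(grid), len(grid[0])
--     bg = Counter(grid[r][c] for r in range(rows) for c in range(cols)).most_common(1)[0][0]
--
--     non_bg = [(r, c) for r in range(rows) for c in range(cols) if grid[r][c] != bg]
--     if not non_bg:
--         return [row[:] for row in grid]
--
--     bb_r1 = min(r for r, c in non_bg)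
--     bb_r2 = max(r for r, c in non_bg)
--     bb_c1 = min(c for r, c in non_bg)
--     bb_c2 = max(c for r, c in non_bg)
--
--     if bb_r1 <= rows - 1 - bb_r2:
--         ext_r1, ext_r2 = 0, bb_r2
--     else:
--         ext_r1, ext_r2 = bb_r1, rows - 1
--
--     if bb_c1 <= cols - 1 - bb_c2:
--         ext_c1, ext_c2 = 0, bb_c2
--     else:
--         ext_c1, ext_c2 = bb_c1, cols - 1
--
--     tile_h = ext_r2 - ext_r1 + 1
--     tile_w = ext_c2 - ext_c1 + 1
--     period_v = tile_h + 1
--     period_h = tile_w + 1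
--
--     # 1-D placement maps: which tile row/column (if any) each output row/column
--     # shows, computed once per axis by a wrapping counter instead of two modulo
--     # operations per cell; rows are then assembled by blitting from the maps.
--     def axis_map(n, ext1, tile, period):
--         m = []
--         d = (-ext1) % period
--         for _ in range(n):
--             m.append(ext1 + d if d < tile else None)
--             d = 0 if d + 1 == period else d + 1
--         return m
--
--     rmap = axis_map(rows, ext_r1, tile_h, period_v)
--     cmap = axis_map(cols, ext_c1, tile_w, period_h)
--
--     return [[bg] * cols if tr is None else
--             [bg if tc is None else grid[tr][tc] for tc in cmap]
--             for tr in rmap]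
-- ===== Notes on version B (the rewrite author's own statement) =====
-- stated objective: alternative
-- what changed: Replaces the per-cell double-modulo test over the rows*cols grid with two 1-D placement maps (one per axis, built by a wrapping counter) from which output rows are assembled by blitting, so no per-cell modulo arithmetic remains.
import Mathlib
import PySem

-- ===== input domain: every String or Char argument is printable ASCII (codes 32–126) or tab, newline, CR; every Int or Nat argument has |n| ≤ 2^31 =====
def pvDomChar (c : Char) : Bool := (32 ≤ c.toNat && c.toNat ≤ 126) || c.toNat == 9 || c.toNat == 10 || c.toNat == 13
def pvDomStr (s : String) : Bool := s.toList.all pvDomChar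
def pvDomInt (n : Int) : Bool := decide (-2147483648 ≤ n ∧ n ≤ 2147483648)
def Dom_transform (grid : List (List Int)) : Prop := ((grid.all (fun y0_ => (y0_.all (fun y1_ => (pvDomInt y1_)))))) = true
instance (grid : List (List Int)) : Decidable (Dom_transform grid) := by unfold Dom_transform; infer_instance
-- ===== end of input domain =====

-- B replaces A's per-cell double-modulo fill by two 1-D placement maps built with a
-- wrapping counter, from which output rows are blitted; return values agree on Pre_.

-- ===== PORT A =====
-- shared helpers: both Python versions contain these identical preamble lines
-- (grid[r][c] indexing, the Counter/most_common background, the non-bg list and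
-- the bounding-box/extension computation), so they are factored once.
def pvIdxI (grid : List (List Int)) (i j : Int) : Int :=
  (PySem.List.pyGet? ((PySem.List.pyGet? grid i).getD []) j).getD 0

def pvCells (grid : List (List Int)) (rows cols : Nat) : List Int :=
  (List.range rows).flatMap (fun (r : Nat) => (List.range cols).map (fun (c : Nat) => pvIdxI grid (r : Int) (c : Int)))

-- Counter(...).most_common(1)[0][0]: first key of maximal count (stable desc sort)
def pvBg (cells : List Int) : Int :=
  ((PySem.List.sorted (PySem.Dict.counter cells).items (fun kv => kv.2) true).headD (0, 0)).1

def pvNonBg (grid : List (List Int)) (rows cols : Nat) (bg : Int) : List (Nat × Nat) :=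
  (List.range rows).flatMap (fun (r : Nat) =>
    ((List.range cols).filter (fun (c : Nat) => pvIdxI grid (r : Int) (c : Int) != bg)).map (fun (c : Nat) => (r, c)))

-- the bb_r1..bb_c2 mins/maxes and the two if/else extensions of A (and B)
def pvExt (rows cols : Nat) (nonbg : List (Nat × Nat)) : (Int × Int) × (Int × Int) :=
  let bbr1 : Int := (((PySem.List.min? (nonbg.map (fun p => p.1)) (fun x => x)).getD 0 : Nat) : Int)
  let bbr2 : Int := (((PySem.List.max? (nonbg.map (fun p => p.1)) (fun x => x)).getD 0 : Nat) : Int)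
  let bbc1 : Int := (((PySem.List.min? (nonbg.map (fun p => p.2)) (fun x => x)).getD 0 : Nat) : Int)
  let bbc2 : Int := (((PySem.List.max? (nonbg.map (fun p => p.2)) (fun x => x)).getD 0 : Nat) : Int)
  ((if bbr1 ≤ (rows : Int) - 1 - bbr2 then ((0 : Int), bbr2) else (bbr1, (rows : Int) - 1)),
   (if bbc1 ≤ (cols : Int) - 1 - bbc2 then ((0 : Int), bbc2) else (bbc1, (cols : Int) - 1)))

def transform (grid : List (List Int)) : List (List Int) :=
  let rows := grid.length
  let cols := (grid.headD []).length
  let bg := pvBg (pvCells grid rows cols)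
  let nonbg := pvNonBg grid rows cols bg
  if nonbg.isEmpty then grid.map (fun row => row) else
    let e := pvExt rows cols nonbg
    let th := e.1.2 - e.1.1 + 1
    let tw := e.2.2 - e.2.1 + 1
    (List.range rows).foldl (fun out (r : Nat) =>
      out.set r ((List.range cols).foldl (fun row (c : Nat) =>
        if PySem.Int.mod ((r : Int) - e.1.1) (th + 1) < th ∧
           PySem.Int.mod ((c : Int) - e.2.1) (tw + 1) < tw then
          row.set c (pvIdxI grid (e.1.1 + PySem.Int.mod ((r : Int) - e.1.1) (th + 1))
                              (e.2.1 + PySem.Int.mod ((c : Int) - e.2.1) (tw + 1)))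
        else row) (out.getD r [])))
      ((List.range rows).map (fun _ => List.replicate cols bg))

-- ===== PORT B =====
-- axis_map of Source B: wrapping-counter scan producing the per-axis placement map
def pvAxisMap (n : Nat) (e1 tile p : Int) : List (Option Int) :=
  ((List.range n).foldl (fun (st : List (Option Int) × Int) _ =>
      (st.1 ++ [if st.2 < tile then some (e1 + st.2) else none],
       if st.2 + 1 = p then 0 else st.2 + 1))
    ([], PySem.Int.mod (0 - e1) p)).1

def transform_alt (grid : List (List Int)) : List (List Int) :=
  let rows := grid.length
  let cols := (grid.headD []).length
  let bg := pvBg (pvCells grid rows cols)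
  let nonbg := pvNonBg grid rows cols bg
  if nonbg.isEmpty then grid.map (fun row => row) else
    let e := pvExt rows cols nonbg
    let th := e.1.2 - e.1.1 + 1
    let tw := e.2.2 - e.2.1 + 1
    (pvAxisMap rows e.1.1 th (th + 1)).map (fun tr =>
      match tr with
      | none => List.replicate cols bg
      | some tr => (pvAxisMap cols e.2.1 tw (tw + 1)).map (fun tc =>
          match tc with
          | none => bg
          | some tc => pvIdxI grid tr tc))

-- ===== PRECONDITION & SPEC =====
-- Pre_ excludes exactly the inputs on which Python A raises (IndexError): the empty
-- grid, a grid whose first row is empty, or a row shorter than the first row.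
def Pre_transform (grid : List (List Int)) : Prop :=
  grid ≠ [] ∧ 0 < (grid.headD []).length ∧ ∀ row ∈ grid, (grid.headD []).length ≤ row.length
instance (grid : List (List Int)) : Decidable (Pre_transform grid) := by unfold Pre_transform; infer_instance

def pvWitness_transform : List (List Int) := [[1, 1], [1, 2]]

def Spec_transform (grid : List (List Int)) (out : List (List Int)) : Prop := out = transform_alt grid
instance (grid : List (List Int)) (out : List (List Int)) : Decidable (Spec_transform grid out) := by unfold Spec_transform; infer_instance

-- ===== CLAIM (what is proved, stated in full; the proofs are below) =====
def Claim_equal_transform : Prop := ∀ (grid : List (List Int)), Dom_transform grid → Pre_transform grid → Spec_transform grid (transform grid)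

-- ===== LEMMAS AND PROOFS =====

lemma pv_mod_step (x p : Int) (hp : 1 < p) :
    PySem.Int.mod (x + 1) p =
      if PySem.Int.mod x p + 1 = p then 0 else PySem.Int.mod x p + 1 := by
  rw [PySem.Int.mod_eq_emod_of_pos (by omega), PySem.Int.mod_eq_emod_of_pos (by omega)]
  have h0 : 0 ≤ x % p := Int.emod_nonneg x (by omega)
  have h1 : x % p < p := Int.emod_lt_of_pos x (by omega)
  have hx : x + 1 = (x % p + 1) + p * (x / p) := by
    have := Int.mul_ediv_add_emod x p; omega
  have key : (x + 1) % p = (x % p + 1) % p := by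
    rw [hx, Int.add_mul_emod_self_left]
  by_cases hc : x % p + 1 = p
  · rw [key, hc, Int.emod_self]; simp
  · rw [key, Int.emod_eq_of_lt (by omega) (by omega), if_neg hc]

lemma pv_axisMap_fold (n : Nat) (e1 tile p : Int) (hp : 1 < p) :
    (List.range n).foldl (fun (st : List (Option Int) × Int) _ =>
      (st.1 ++ [if st.2 < tile then some (e1 + st.2) else none],
       if st.2 + 1 = p then 0 else st.2 + 1)) ([], PySem.Int.mod (0 - e1) p)
    = ((List.range n).map (fun (i : Nat) =>
        if PySem.Int.mod ((i : Int) - e1) p < tile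
        then some (e1 + PySem.Int.mod ((i : Int) - e1) p) else none),
       PySem.Int.mod ((n : Int) - e1) p) := by
  induction n with
  | zero => simp
  | succ n ih =>
    rw [List.range_succ, List.foldl_append, ih, List.map_append]
    have hs : PySem.Int.mod (((n + 1 : Nat) : Int) - e1) p =
        if PySem.Int.mod ((n : Int) - e1) p + 1 = p then 0
        else PySem.Int.mod ((n : Int) - e1) p + 1 := by
      have hc : ((n + 1 : Nat) : Int) - e1 = ((n : Nat) : Int) - e1 + 1 := by push_cast; ring
      rw [hc, pv_mod_step _ _ hp]
    push_cast at hs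
    simp [hs]

lemma pv_setloop_length {β : Type} (F : Nat → β → β) (dflt : β) (out0 : List β) (n : Nat) :
    ((List.range n).foldl (fun out r => out.set r (F r (out.getD r dflt))) out0).length
      = out0.length := by
  induction n with
  | zero => simp
  | succ n ih =>
    rw [List.range_succ, List.foldl_append]
    simp only [List.foldl_cons, List.foldl_nil, List.length_set]
    exact ih

lemma pv_setloop_getElem? {β : Type} (F : Nat → β → β) (dflt : β) (out0 : List β) (n j : Nat)
    (hj : j < out0.length) :
    ((List.range n).foldl (fun out r => out.set r (F r (out.getD r dflt))) out0)[j]?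
      = some (if j < n then F j (out0[j]'hj) else out0[j]'hj) := by
  induction n with
  | zero => simp [List.getElem?_eq_getElem hj]
  | succ n ih =>
    rw [List.range_succ, List.foldl_append]
    simp only [List.foldl_cons, List.foldl_nil]
    rw [List.getElem?_set]
    by_cases hnj : n = j
    · subst hnj
      rw [if_pos rfl, List.getD_eq_getElem?_getD, ih]
      rw [if_pos (by rw [pv_setloop_length]; exact hj)]
      simp only [Option.getD_some]
      rw [if_neg (by omega), if_pos (by omega)]
    · rw [if_neg hnj, ih]
      by_cases h2 : j < n
      · rw [if_pos h2, if_pos (by omega)]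
      · rw [if_neg h2, if_neg (by omega)]

lemma pv_rowloop_length {α : Type} (P : Nat → Prop) [DecidablePred P] (g : Nat → α)
    (row0 : List α) (n : Nat) :
    ((List.range n).foldl (fun row c => if P c then row.set c (g c) else row) row0).length
      = row0.length := by
  induction n with
  | zero => simp
  | succ n ih =>
    rw [List.range_succ, List.foldl_append]
    simp only [List.foldl_cons, List.foldl_nil]
    by_cases hP : P n
    · rw [if_pos hP]; simp only [List.length_set]; exact ih
    · rw [if_neg hP]; exact ih

lemma pv_rowloop_getElem? {α : Type} (P : Nat → Prop) [DecidablePred P] (g : Nat → α)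
    (row0 : List α) (n j : Nat) (hj : j < row0.length) :
    ((List.range n).foldl (fun row c => if P c then row.set c (g c) else row) row0)[j]?
      = some (if j < n ∧ P j then g j else row0[j]'hj) := by
  induction n with
  | zero => simp [List.getElem?_eq_getElem hj]
  | succ n ih =>
    rw [List.range_succ, List.foldl_append]
    simp only [List.foldl_cons, List.foldl_nil]
    by_cases hP : P n
    · rw [if_pos hP, List.getElem?_set]
      by_cases hnj : n = j
      · subst hnj
        rw [if_pos rfl, if_pos (by rw [pv_rowloop_length]; exact hj), if_pos ⟨by omega, hP⟩]
      · rw [if_neg hnj, ih]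
        by_cases h2 : j < n ∧ P j
        · rw [if_pos h2, if_pos ⟨by omega, h2.2⟩]
        · rw [if_neg h2, if_neg (by rintro ⟨h3, h4⟩; exact h2 ⟨by omega, h4⟩)]
    · rw [if_neg hP, ih]
      by_cases h2 : j < n ∧ P j
      · rw [if_pos h2, if_pos ⟨by omega, h2.2⟩]
      · have hcond : ¬ (j < n + 1 ∧ P j) := by
          rintro ⟨h3, h4⟩
          rcases Nat.lt_succ_iff_lt_or_eq.mp h3 with h | h
          · exact h2 ⟨h, h4⟩
          · exact hP (h ▸ h4)
        rw [if_neg h2, if_neg hcond]lemma pv_axisMap_eq (n : Nat) (e1 tile p : Int) (hp : 1 < p) :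
    pvAxisMap n e1 tile p = (List.range n).map (fun (i : Nat) =>
      if PySem.Int.mod ((i : Int) - e1) p < tile
      then some (e1 + PySem.Int.mod ((i : Int) - e1) p) else none) := by
  unfold pvAxisMap
  rw [pv_axisMap_fold n e1 tile p hp]

lemma pv_nonBg_mem (grid : List (List Int)) (rows cols : Nat) (bg : Int) (q : Nat × Nat)
    (hq : q ∈ pvNonBg grid rows cols bg) : q.1 < rows ∧ q.2 < cols := by
  simp only [pvNonBg, List.mem_flatMap, List.mem_map, List.mem_filter, List.mem_range] at hq
  obtain ⟨r, hr, c, ⟨hc, _⟩, rfl⟩ := hq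
  exact ⟨hr, hc⟩

lemma pv_ext_le (rows cols : Nat) (nonbg : List (Nat × Nat)) (hne : nonbg ≠ [])
    (hmem : ∀ q ∈ nonbg, q.1 < rows ∧ q.2 < cols) :
    (pvExt rows cols nonbg).1.1 ≤ (pvExt rows cols nonbg).1.2 ∧
      (pvExt rows cols nonbg).2.1 ≤ (pvExt rows cols nonbg).2.2 := by
  have h1 : nonbg.map (fun p => p.1) ≠ [] := by simpa using hne
  have h2 : nonbg.map (fun p => p.2) ≠ [] := by simpa using hne
  obtain ⟨m1, hm1⟩ : ∃ m, PySem.List.min? (nonbg.map (fun p => p.1)) (fun x => x) = some m := by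
    cases h : PySem.List.min? (nonbg.map (fun p => p.1)) (fun x => x) with
    | none => exact absurd ((PySem.List.min?_eq_none_iff _ _).mp h) h1
    | some m => exact ⟨m, rfl⟩
  obtain ⟨m2, hm2⟩ : ∃ m, PySem.List.min? (nonbg.map (fun p => p.2)) (fun x => x) = some m := by
    cases h : PySem.List.min? (nonbg.map (fun p => p.2)) (fun x => x) with
    | none => exact absurd ((PySem.List.min?_eq_none_iff _ _).mp h) h2
    | some m => exact ⟨m, rfl⟩
  have hb1 : m1 < rows := by
    have := PySem.List.min?_mem hm1
    simp only [List.mem_map] at this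
    obtain ⟨q, hq, rfl⟩ := this
    exact (hmem q hq).1
  have hb2 : m2 < cols := by
    have := PySem.List.min?_mem hm2
    simp only [List.mem_map] at this
    obtain ⟨q, hq, rfl⟩ := this
    exact (hmem q hq).2
  unfold pvExt
  rw [hm1, hm2]
  simp only [Option.getD_some]
  constructor
  · split_ifs <;> simp <;> omega
  · split_ifs <;> simp <;> omega

def pvRowFun (grid : List (List Int)) (cols : Nat) (e1r e1c th tw : Int) (r : Nat)
    (row0 : List Int) : List Int :=
  (List.range cols).foldl (fun row (c : Nat) =>
    if PySem.Int.mod ((r : Int) - e1r) (th + 1) < th ∧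
       PySem.Int.mod ((c : Int) - e1c) (tw + 1) < tw then
      row.set c (pvIdxI grid (e1r + PySem.Int.mod ((r : Int) - e1r) (th + 1))
                          (e1c + PySem.Int.mod ((c : Int) - e1c) (tw + 1)))
    else row) row0

lemma pv_rowFun_length (grid : List (List Int)) (cols : Nat) (e1r e1c th tw : Int) (r : Nat)
    (row0 : List Int) : (pvRowFun grid cols e1r e1c th tw r row0).length = row0.length := by
  unfold pvRowFun
  exact pv_rowloop_length _ _ row0 cols

lemma pv_row_eq_neg (grid : List (List Int)) (cols : Nat) (bg : Int) (e1r e1c th tw : Int)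
    (r : Nat) (h : ¬ PySem.Int.mod ((r : Int) - e1r) (th + 1) < th) :
    pvRowFun grid cols e1r e1c th tw r (List.replicate cols bg) = List.replicate cols bg := by
  apply List.ext_getElem?
  intro j
  by_cases hj : j < cols
  · unfold pvRowFun
    rw [pv_rowloop_getElem? _ _ _ cols j (by simpa using hj)]
    rw [if_neg (by rintro ⟨-, h2, -⟩; exact h h2)]
    simp [hj]
  · rw [List.getElem?_eq_none (by rw [pv_rowFun_length]; simpa using Nat.le_of_not_lt hj),
        List.getElem?_eq_none (by simpa using Nat.le_of_not_lt hj)]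

lemma pv_row_eq_pos (grid : List (List Int)) (cols : Nat) (bg : Int) (e1r e1c th tw : Int)
    (r : Nat) (h : PySem.Int.mod ((r : Int) - e1r) (th + 1) < th) :
    pvRowFun grid cols e1r e1c th tw r (List.replicate cols bg)
      = ((List.range cols).map (fun (i : Nat) =>
          if PySem.Int.mod ((i : Int) - e1c) (tw + 1) < tw
          then some (e1c + PySem.Int.mod ((i : Int) - e1c) (tw + 1)) else none)).map
          (fun tc => match tc with
            | none => bg
            | some tc => pvIdxI grid (e1r + PySem.Int.mod ((r : Int) - e1r) (th + 1)) tc) := by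
  apply List.ext_getElem?
  intro j
  by_cases hj : j < cols
  · unfold pvRowFun
    rw [pv_rowloop_getElem? _ _ _ cols j (by simpa using hj)]
    rw [List.getElem?_map, List.getElem?_map, List.getElem?_eq_getElem (by simpa using hj)]
    simp only [List.getElem_range, Option.map_some]
    by_cases hc : PySem.Int.mod ((j : Int) - e1c) (tw + 1) < tw
    · rw [if_pos ⟨hj, h, hc⟩, if_pos hc]
    · rw [if_neg (by rintro ⟨-, -, h2⟩; exact hc h2), if_neg hc]
      simp
  · rw [List.getElem?_eq_none (by rw [pv_rowFun_length]; simpa using Nat.le_of_not_lt hj),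
        List.getElem?_eq_none (by simpa using Nat.le_of_not_lt hj)]

lemma pv_core_eq (grid : List (List Int)) (rows cols : Nat) (bg : Int) (e1r e1c th tw : Int)
    (hth : 1 ≤ th) (htw : 1 ≤ tw) :
    (List.range rows).foldl (fun out (r : Nat) =>
      out.set r ((List.range cols).foldl (fun row (c : Nat) =>
        if PySem.Int.mod ((r : Int) - e1r) (th + 1) < th ∧
           PySem.Int.mod ((c : Int) - e1c) (tw + 1) < tw then
          row.set c (pvIdxI grid (e1r + PySem.Int.mod ((r : Int) - e1r) (th + 1))
                              (e1c + PySem.Int.mod ((c : Int) - e1c) (tw + 1)))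
        else row) (out.getD r [])))
      ((List.range rows).map (fun _ => List.replicate cols bg))
    = (pvAxisMap rows e1r th (th + 1)).map (fun tr =>
        match tr with
        | none => List.replicate cols bg
        | some tr => (pvAxisMap cols e1c tw (tw + 1)).map (fun tc =>
            match tc with
            | none => bg
            | some tc => pvIdxI grid tr tc)) := by
  rw [pv_axisMap_eq rows e1r th (th + 1) (by omega), pv_axisMap_eq cols e1c tw (tw + 1) (by omega)]
  show (List.range rows).foldl (fun out (r : Nat) =>
      out.set r (pvRowFun grid cols e1r e1c th tw r (out.getD r [])))
      ((List.range rows).map (fun _ => List.replicate cols bg)) = _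
  apply List.ext_getElem?
  intro j
  by_cases hj : j < rows
  · have hj0 : j < ((List.range rows).map (fun _ => List.replicate cols bg)).length := by
      simpa using hj
    rw [pv_setloop_getElem? (pvRowFun grid cols e1r e1c th tw) [] _ rows j hj0, if_pos hj]
    rw [List.getElem?_map, List.getElem?_map, List.getElem?_eq_getElem (by simpa using hj)]
    simp only [List.getElem_range, List.getElem_map, Option.map_some]
    by_cases hmv : PySem.Int.mod ((j : Int) - e1r) (th + 1) < th
    · rw [pv_row_eq_pos grid cols bg e1r e1c th tw j hmv, if_pos hmv]
    · rw [pv_row_eq_neg grid cols bg e1r e1c th tw j hmv, if_neg hmv]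
  · rw [List.getElem?_eq_none, List.getElem?_eq_none]
    · simp only [List.length_map, List.length_range]; omega
    · rw [pv_setloop_length]; simp only [List.length_map, List.length_range]; omega

-- ===== VERDICT (by name: the statement is the Claim_ definition above) =====
theorem transform_spec : Claim_equal_transform := by
  intro grid _hdom _hpre
  unfold Spec_transform
  unfold transform transform_alt
  by_cases hne : pvNonBg grid grid.length (grid.headD []).length
      (pvBg (pvCells grid grid.length (grid.headD []).length)) = []
  · simp only [hne, List.isEmpty_nil, if_pos]
  · rw [if_neg (by simpa [List.isEmpty_iff] using hne), if_neg (by simpa [List.isEmpty_iff] using hne)]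
    have hext := pv_ext_le grid.length (grid.headD []).length
      (pvNonBg grid grid.length (grid.headD []).length
        (pvBg (pvCells grid grid.length (grid.headD []).length))) hne
      (fun q hq => pv_nonBg_mem _ _ _ _ q hq)
    exact pv_core_eq grid _ _ _ _ _ _ _ (by omega) (by omega)
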